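-- pv_equiv track=rewrite | github.com/julienperichon/advent-of-code | 2023/day_13_v2.py | check_symmetry_axis
-- ===== SOURCE A (Python) =====
-- def check_symmetry_axis(pattern: list[str], potential_symmetry_axis: int) -> bool:
--     n_rows = len(pattern)
--     lb, ub = (
--         max(0, n_rows - 2 * (n_rows - potential_symmetry_axis)),
--         min(n_rows, 2 * potential_symmetry_axis),
--     )
--     before_axis = "".join(pattern[lb:potential_symmetry_axis][::-1])
--     after_axis = "".join(pattern[potential_symmetry_axis:ub])
--     return sum([before_axis[i] != after_axis[i] for i in range(len(before_axis))]) == 1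
-- ===== SOURCE B (Python) =====
-- def _lcp(x, y):
--     """Length of the longest common prefix of two sequences."""
--     k = 0
--     for a, b in zip(x, y):
--         if a != b:
--             break
--         k += 1
--     return k
--
--
-- def check_symmetry_axis(pattern: list[str], potential_symmetry_axis: int) -> bool:
--     n = len(pattern)
--     before = "".join(pattern[max(0, 2 * potential_symmetry_axis - n):potential_symmetry_axis][::-1])
--     after = "".join(pattern[potential_symmetry_axis:min(n, 2 * potential_symmetry_axis)])[:len(before)]
--     # Exactly one mismatch  <=>  common prefix + common suffix cover all but one char.
--     p = _lcp(before, after)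
--     s = _lcp(before[p:][::-1], after[p:][::-1])
--     return p + s == len(before) - 1
-- ===== Notes on version B (the rewrite author's own statement) =====
-- stated objective: alternative
-- what changed: B never counts mismatches: it computes the longest common prefix and the longest common suffix of the two reflected texts and decides by the identity lcp + lcs == len - 1, which holds iff exactly one position differs, replacing A's per-index indicator-list sum.
import Mathlib
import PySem

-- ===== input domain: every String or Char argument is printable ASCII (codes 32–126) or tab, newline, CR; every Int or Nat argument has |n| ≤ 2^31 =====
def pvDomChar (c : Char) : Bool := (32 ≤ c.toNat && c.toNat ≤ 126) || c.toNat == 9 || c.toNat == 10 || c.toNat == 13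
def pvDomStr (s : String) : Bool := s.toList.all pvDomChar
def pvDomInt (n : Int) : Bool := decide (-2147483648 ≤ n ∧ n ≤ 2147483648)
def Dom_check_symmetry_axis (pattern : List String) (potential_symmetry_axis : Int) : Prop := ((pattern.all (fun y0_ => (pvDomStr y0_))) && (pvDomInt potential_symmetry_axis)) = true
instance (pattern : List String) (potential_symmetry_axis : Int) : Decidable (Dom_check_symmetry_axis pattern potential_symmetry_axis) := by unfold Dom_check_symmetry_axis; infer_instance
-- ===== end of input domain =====

-- B decides "exactly one mismatch" without any counting: it measures the longest
-- common prefix and the longest common suffix of the two reflected texts and tests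
-- lcp + lcs == len - 1 (objective: alternative decomposition, same asymptotic cost).


-- ===== PORT A =====
def check_symmetry_axis (pattern : List String) (potential_symmetry_axis : Int) : Bool :=
  let n_rows : Int := pattern.length
  let lb : Int := max 0 (n_rows - 2 * (n_rows - potential_symmetry_axis))
  let ub : Int := min n_rows (2 * potential_symmetry_axis)
  let before_axis : String :=
    PySem.Str.join "" ((PySem.List.slice pattern (some lb) (some potential_symmetry_axis)).reverse)
  let after_axis : String :=
    PySem.Str.join "" (PySem.List.slice pattern (some potential_symmetry_axis) (some ub))
  -- before_axis[i] can raise IndexError in Python; Pre_ excludes exactly those inputs,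
  -- so comparing the two Option results is exact there.
  (((PySem.List.pyRange 0 (PySem.Str.len before_axis) 1).map
      (fun i => if PySem.Str.pyGet? before_axis i ≠ PySem.Str.pyGet? after_axis i then (1 : Int) else 0)).sum) == 1

-- ===== PORT B =====
-- Source B's _lcp: the for-loop over zip(x, y) counting the matching prefix.
def pvLcp : List Char → List Char → Nat
  | a :: xs, b :: ys => if a = b then pvLcp xs ys + 1 else 0
  | _, _ => 0

def check_symmetry_axis_alt (pattern : List String) (potential_symmetry_axis : Int) : Bool :=
  let n : Int := pattern.length
  let before : List Char :=
    (PySem.Str.join "" ((PySem.List.slice pattern (some (max 0 (2 * potential_symmetry_axis - n))) (some potential_symmetry_axis)).reverse)).toList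
  -- after[:len(before)] — a nonnegative-stop string slice, exactly List.take.
  let after : List Char :=
    ((PySem.Str.join "" (PySem.List.slice pattern (some potential_symmetry_axis) (some (min n (2 * potential_symmetry_axis))))).toList).take before.length
  let p : Nat := pvLcp before after
  -- before[p:][::-1] with 0 ≤ p: exactly (List.drop p).reverse.
  let s : Nat := pvLcp ((before.drop p).reverse) ((after.drop p).reverse)
  ((p : Int) + (s : Int) == (before.length : Int) - 1)

-- ===== PRECONDITION & SPEC =====
-- Pre_ excludes exactly the inputs where Python A raises IndexError: those where the
-- flattened before-axis text is longer than the flattened after-axis text (ragged rows,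
-- or an axis outside [0, len(pattern)]); B returns a value there.
def Pre_check_symmetry_axis (pattern : List String) (potential_symmetry_axis : Int) : Prop :=
  ((PySem.List.slice pattern (some (max 0 (2 * potential_symmetry_axis - (pattern.length : Int)))) (some potential_symmetry_axis)).map PySem.Str.len).sum ≤
  ((PySem.List.slice pattern (some potential_symmetry_axis) (some (min (pattern.length : Int) (2 * potential_symmetry_axis)))).map PySem.Str.len).sum
instance (pattern : List String) (potential_symmetry_axis : Int) : Decidable (Pre_check_symmetry_axis pattern potential_symmetry_axis) := by unfold Pre_check_symmetry_axis; infer_instance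

def pvWitness_check_symmetry_axis : List String × Int := (["#.", "#."], 1)

def Spec_check_symmetry_axis (pattern : List String) (potential_symmetry_axis : Int) (out : Bool) : Prop := out = check_symmetry_axis_alt pattern potential_symmetry_axis
instance (pattern : List String) (potential_symmetry_axis : Int) (out : Bool) : Decidable (Spec_check_symmetry_axis pattern potential_symmetry_axis out) := by unfold Spec_check_symmetry_axis; infer_instance

-- ===== CLAIM (what is proved, stated in full; the proofs are below) =====
def Claim_equal_check_symmetry_axis : Prop := ∀ (pattern : List String) (potential_symmetry_axis : Int), Dom_check_symmetry_axis pattern potential_symmetry_axis → Pre_check_symmetry_axis pattern potential_symmetry_axis → Spec_check_symmetry_axis pattern potential_symmetry_axis (check_symmetry_axis pattern potential_symmetry_axis)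

-- ===== LEMMAS AND PROOFS =====

theorem pv_intercalate_nil (l : List (List Char)) : [].intercalate l = l.flatten := by
  induction l with
  | nil => rfl
  | cons x l ih =>
    cases l with
    | nil => simp [List.intercalate]
    | cons y t => simp_all [List.intercalate, List.intersperse]

theorem pv_toList_join (l : List String) :
    (PySem.Str.join "" l).toList = l.flatMap String.toList := by
  rw [PySem.Str.toList_join]
  show PySem.Chars.join [] _ = _
  rw [PySem.Chars.join, pv_intercalate_nil, ← List.flatMap_def]

-- A's indicator-sum over indices equals the mismatch count of the zip, when the
-- first list is no longer than the second.
theorem pv_sum_eq_countP (bc ac : List Char) (h : bc.length ≤ ac.length) :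
    ((List.range bc.length).map
        (fun k => if bc[k]? ≠ ac[k]? then (1 : Int) else 0)).sum
      = ((bc.zip ac).countP (fun p => p.1 ≠ p.2) : Int) := by
  induction bc generalizing ac with
  | nil => simp
  | cons a bc' ih =>
    cases ac with
    | nil => simp at h
    | cons b ac' =>
      rw [List.length_cons, List.range_succ_eq_map, List.map_cons, List.map_map, List.sum_cons]
      have e2 : ((List.range bc'.length).map
          ((fun k => if (a :: bc')[k]? ≠ (b :: ac')[k]? then (1 : Int) else 0) ∘ Nat.succ))
          = (List.range bc'.length).map (fun k => if bc'[k]? ≠ ac'[k]? then (1 : Int) else 0) := by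
        apply List.map_congr_left
        intro k _
        simp
      rw [e2, ih ac' (by simpa using h), List.zip_cons_cons, List.countP_cons]
      by_cases hab : a = b
      · simp [hab]
      · simp only [List.getElem?_cons_zero]
        rw [if_pos (by simpa using hab)]
        have : (decide ¬(a, b).1 = (a, b).2) = true := by simpa using hab
        rw [this, if_pos rfl]
        push_cast
        ring

theorem pv_len_flatMap (l : List String) :
    ((l.flatMap String.toList).length : Int) = (l.map PySem.Str.len).sum := by
  induction l with
  | nil => simp
  | cons s l ih =>
    simp only [List.flatMap_cons, List.length_append, List.map_cons, List.sum_cons,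
      PySem.Str.len_eq, ← ih]
    push_cast
    ring

theorem pv_lcp_le (xs ys : List Char) : pvLcp xs ys ≤ xs.length := by
  induction xs generalizing ys with
  | nil => simp [pvLcp]
  | cons a xs ih =>
    cases ys with
    | nil => simp [pvLcp]
    | cons b ys =>
      by_cases h : a = b
      · simp only [pvLcp, if_pos h, List.length_cons]
        exact Nat.add_le_add_right (ih ys) 1
      · simp [pvLcp, h]

theorem pv_lcp_eq_length_iff (xs ys : List Char) (h : xs.length = ys.length) :
    pvLcp xs ys = xs.length ↔ xs = ys := by
  induction xs generalizing ys with
  | nil => simp [pvLcp]; cases ys <;> simp_all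
  | cons a xs ih =>
    cases ys with
    | nil => simp at h
    | cons b ys =>
      by_cases hab : a = b
      · simp only [pvLcp, if_pos hab, List.length_cons, Nat.add_right_cancel_iff]
        rw [ih ys (by simpa using h)]
        simp [hab]
      · simp [pvLcp, hab]

theorem pv_lcp_append_last (u v : List Char) (a b : Char) (h : u.length = v.length) :
    pvLcp (u ++ [a]) (v ++ [b]) =
      if u = v then (if a = b then u.length + 1 else u.length) else pvLcp u v := by
  induction u generalizing v with
  | nil =>
    cases v with
    | nil => by_cases hab : a = b <;> simp [pvLcp, hab]
    | cons => simp at h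
  | cons x u ih =>
    cases v with
    | nil => simp at h
    | cons y v =>
      by_cases hxy : x = y
      · subst hxy
        simp only [List.cons_append, pvLcp, ih v (by simpa using h)]
        by_cases huv : u = v
        · subst huv
          by_cases hab : a = b <;> simp [hab]
        · simp [huv]
      · simp [pvLcp, hxy, List.cons_append]

theorem pv_countP_zero_iff (xs ys : List Char) (h : xs.length = ys.length) :
    (xs.zip ys).countP (fun p => p.1 ≠ p.2) = 0 ↔ xs = ys := by
  induction xs generalizing ys with
  | nil => cases ys <;> simp_all
  | cons a xs ih =>
    cases ys with
    | nil => simp at h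
    | cons b ys =>
      rw [List.zip_cons_cons, List.countP_cons]
      by_cases hab : a = b
      · subst hab
        rw [if_neg (by simp), Nat.add_zero, ih ys (by simpa using h)]
        simp
      · rw [if_pos (by simpa using hab)]
        simp [hab]

-- The two-ended judgment equals "exactly one mismatch", for equal-length lists.
theorem pv_key (bc ac : List Char) (h : bc.length = ac.length) :
    (((pvLcp bc ac : Int) +
        ((pvLcp ((bc.drop (pvLcp bc ac)).reverse) ((ac.drop (pvLcp bc ac)).reverse)) : Int)
        == (bc.length : Int) - 1))
      = (((bc.zip ac).countP (fun p => p.1 ≠ p.2) : Int) == 1) := by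
  induction bc generalizing ac with
  | nil =>
    cases ac with
    | nil => simp [pvLcp]
    | cons => simp at h
  | cons a bc ih =>
    cases ac with
    | nil => simp at h
    | cons b ac =>
      have hlen : bc.length = ac.length := by simpa using h
      by_cases hab : a = b
      · -- heads agree: peel one and use the IH
        subst hab
        have hcount : (((a :: bc).zip (a :: ac)).countP (fun p => p.1 ≠ p.2))
            = (bc.zip ac).countP (fun p => p.1 ≠ p.2) := by
          rw [List.zip_cons_cons, List.countP_cons]
          simp
        have hp : pvLcp (a :: bc) (a :: ac) = pvLcp bc ac + 1 := by simp [pvLcp]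
        rw [hp, hcount, List.drop_succ_cons, List.drop_succ_cons, ← ih ac hlen]
        have e1 : ((pvLcp bc ac + 1 : Nat) : Int) = (pvLcp bc ac : Int) + 1 := by push_cast; ring
        have e2 : (((a :: bc).length : Nat) : Int) = (bc.length : Int) + 1 := by
          rw [List.length_cons]; push_cast; ring
        rw [e1, e2]
        by_cases hmain : (pvLcp bc ac : Int) +
            ((pvLcp ((bc.drop (pvLcp bc ac)).reverse) ((ac.drop (pvLcp bc ac)).reverse)) : Int)
            = (bc.length : Int) - 1
        · rw [beq_iff_eq.mpr (by omega), beq_iff_eq.mpr hmain]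
        · rw [beq_eq_false_iff_ne.mpr (by omega), beq_eq_false_iff_ne.mpr hmain]
      · -- heads differ: p = 0, decide by the suffix
        have hdec : (decide ¬(a, b).1 = (a, b).2) = true := by simpa using hab
        have hcount : (((a :: bc).zip (b :: ac)).countP (fun p => p.1 ≠ p.2))
            = (bc.zip ac).countP (fun p => p.1 ≠ p.2) + 1 := by
          rw [List.zip_cons_cons, List.countP_cons, hdec, if_pos rfl]
        simp only [pvLcp, if_neg hab, List.drop_zero, List.reverse_cons, hcount,
          Nat.cast_zero, zero_add, List.length_cons]
        rw [pv_lcp_append_last bc.reverse ac.reverse a b (by simp [hlen])]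
        by_cases heq : bc = ac
        · subst heq
          have hc0 : (bc.zip bc).countP (fun p => p.1 ≠ p.2) = 0 :=
            (pv_countP_zero_iff bc bc rfl).mpr rfl
          rw [if_pos rfl, if_neg hab, hc0]
          simp
        · have hrev : bc.reverse ≠ ac.reverse := fun hr => heq (by
            simpa using congrArg List.reverse hr)
          rw [if_neg hrev]
          have hlt : pvLcp bc.reverse ac.reverse < bc.length := by
            have hle := pv_lcp_le bc.reverse ac.reverse
            rcases Nat.lt_or_ge (pvLcp bc.reverse ac.reverse) bc.reverse.length with hl | hg
            · simpa using hl
            · exfalso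
              have : pvLcp bc.reverse ac.reverse = bc.reverse.length := le_antisymm hle hg
              exact hrev ((pv_lcp_eq_length_iff bc.reverse ac.reverse (by simp [hlen])).mp this)
          have hcpos : 0 < (bc.zip ac).countP (fun p => p.1 ≠ p.2) := by
            rcases Nat.eq_zero_or_pos ((bc.zip ac).countP (fun p => p.1 ≠ p.2)) with h0 | hp
            · exact absurd ((pv_countP_zero_iff bc ac hlen).mp h0) heq
            · exact hp
          rw [beq_eq_false_iff_ne.mpr (by push_cast; omega),
            beq_eq_false_iff_ne.mpr (by push_cast; omega)]

-- zip with the truncated right list is the same zip.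
theorem pv_zip_take (xs ys : List Char) : xs.zip (ys.take xs.length) = xs.zip ys := by
  induction xs generalizing ys with
  | nil => simp
  | cons a xs ih =>
    cases ys with
    | nil => simp
    | cons b ys => simp [ih]

-- ===== VERDICT (by name: the statement is the Claim_ definition above) =====
theorem check_symmetry_axis_spec : Claim_equal_check_symmetry_axis := by
  intro pattern axis _hdom hpre
  unfold Spec_check_symmetry_axis
  have hlb : (pattern.length : Int) - 2 * ((pattern.length : Int) - axis)
      = 2 * axis - (pattern.length : Int) := by ring
  simp only [check_symmetry_axis, check_symmetry_axis_alt]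
  rw [hlb]
  set sb := (PySem.List.slice pattern (some (max 0 (2 * axis - (pattern.length : Int)))) (some axis)).reverse with hsb
  set sa := PySem.List.slice pattern (some axis) (some (min (pattern.length : Int) (2 * axis))) with hsa
  set bc : List Char := sb.flatMap String.toList with hbc
  set ac : List Char := sa.flatMap String.toList with hac
  have hjb : (PySem.Str.join "" sb).toList = bc := pv_toList_join sb
  have hja : (PySem.Str.join "" sa).toList = ac := pv_toList_join sa
  -- Pre_ gives len bc ≤ len ac
  have hlen : bc.length ≤ ac.length := by
    unfold Pre_check_symmetry_axis at hpre
    have h2 : ((bc.length : Int)) ≤ ((ac.length : Int)) := by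
      rw [hbc, hac, pv_len_flatMap, pv_len_flatMap, hsb, List.map_reverse, List.sum_reverse]
      exact hpre
    exact_mod_cast h2
  -- A side: sum = countP of zip
  have hA : ((PySem.List.pyRange 0 (PySem.Str.len (PySem.Str.join "" sb)) 1).map
      (fun i => if PySem.Str.pyGet? (PySem.Str.join "" sb) i ≠ PySem.Str.pyGet? (PySem.Str.join "" sa) i then (1 : Int) else 0)).sum
      = ((List.range bc.length).map (fun k => if bc[k]? ≠ ac[k]? then (1 : Int) else 0)).sum := by
    rw [PySem.Str.len_eq, hjb, PySem.List.pyRange_one]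
    simp only [List.map_map, Function.comp_def, zero_add, Int.toNat_natCast, sub_zero]
    refine congrArg List.sum (List.map_congr_left ?_)
    intro k _
    rw [PySem.Str.pyGet?_natCast, PySem.Str.pyGet?_natCast, hjb, hja]
  rw [hA, pv_sum_eq_countP bc ac hlen, hjb, hja]
  -- B side: the key lemma on bc and the truncated ac
  have htk : (ac.take bc.length).length = bc.length := by
    rw [List.length_take]
    omega
  rw [pv_key bc (ac.take bc.length) htk.symm, pv_zip_take bc ac]
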